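-- pv_equiv track=rewrite | github.com/risingsunomi/dllm | src/dllm/model/__init__.py | _longest_stop_prefix_suffix
-- ===== SOURCE A (Python) =====
-- def _longest_stop_prefix_suffix(text: str, stop: tuple[str, ...]) -> int:
--     longest = 0
--     for marker in stop:
--         max_len = min(len(marker) - 1, len(text))
--         for size in range(max_len, 0, -1):
--             if text.endswith(marker[:size]):
--                 longest = max(longest, size)
--                 break
--     return longest
-- ===== SOURCE B (Python) =====
-- def _longest_stop_prefix_suffix(text: str, stop: tuple[str, ...]) -> int:
--     cap = 0
--     for m in stop:
--         cap = max(cap, len(m) - 1)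
--     cap = min(cap, len(text))
--     for size in range(cap, 0, -1):
--         tail = text[len(text) - size:]
--         if any(size <= len(m) - 1 and m.startswith(tail) for m in stop):
--             return size
--     return 0
-- ===== Notes on version B (the rewrite author's own statement) =====
-- stated objective: alternative
-- what changed: A scans sizes descending once per marker (per-marker break, running max); B does a single global descending scan over candidate overlap lengths, capped by the longest marker, returning at the first length whose text-suffix is a proper prefix of some marker.
import Mathlib
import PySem

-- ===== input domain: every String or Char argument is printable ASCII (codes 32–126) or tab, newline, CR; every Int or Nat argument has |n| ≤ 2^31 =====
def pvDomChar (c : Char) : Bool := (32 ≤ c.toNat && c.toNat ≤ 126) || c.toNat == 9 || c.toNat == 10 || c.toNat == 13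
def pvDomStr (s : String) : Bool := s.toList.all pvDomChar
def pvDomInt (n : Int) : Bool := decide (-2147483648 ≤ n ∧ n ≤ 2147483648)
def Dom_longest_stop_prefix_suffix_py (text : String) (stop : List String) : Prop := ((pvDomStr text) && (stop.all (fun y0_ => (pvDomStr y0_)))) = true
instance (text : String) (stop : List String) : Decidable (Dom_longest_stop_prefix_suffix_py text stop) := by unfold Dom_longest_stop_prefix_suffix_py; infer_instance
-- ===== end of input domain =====

-- B replaces A's per-marker descending scans by one global descending scan over suffix
-- lengths of `text` (capped by the longest marker), returning at the first length whose
-- text-suffix is a proper prefix of some marker: alternative traversal with early global exit.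

-- ===== PORT A =====
-- inner loop: 'for size in range(max_len, 0, -1): if text.endswith(marker[:size]): longest = max(longest, size); break'
def pvAInner (text marker : String) : List Int → Int → Int
  | [], longest => longest
  | size :: rest, longest =>
    if PySem.Str.endswith text (PySem.Str.slice marker none (some size)) then
      max longest size
    else pvAInner text marker rest longest

def pvAStep (text : String) (longest : Int) (marker : String) : Int :=
  let max_len := min (PySem.Str.len marker - 1) (PySem.Str.len text)
  pvAInner text marker (PySem.List.pyRange max_len 0 (-1)) longest

def longest_stop_prefix_suffix_py (text : String) (stop : List String) : Int :=
  stop.foldl (pvAStep text) 0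

-- ===== PORT B =====
-- 'for size in range(cap, 0, -1): tail = text[len(text)-size:]; if any(...): return size' / 'return 0'
def pvBScan (text : String) (stop : List String) : List Int → Int
  | [] => 0
  | size :: rest =>
    let tail := PySem.Str.slice text (some (PySem.Str.len text - size)) none
    if stop.any (fun m => decide (size ≤ PySem.Str.len m - 1) && PySem.Str.startswith m tail) then
      size
    else pvBScan text stop rest

def longest_stop_prefix_suffix_py_alt (text : String) (stop : List String) : Int :=
  let cap0 := stop.foldl (fun acc m => max acc (PySem.Str.len m - 1)) 0
  let cap := min cap0 (PySem.Str.len text)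
  pvBScan text stop (PySem.List.pyRange cap 0 (-1))

-- ===== PRECONDITION & SPEC =====
def Spec_longest_stop_prefix_suffix_py (text : String) (stop : List String) (out : Int) : Prop := out = longest_stop_prefix_suffix_py_alt text stop
instance (text : String) (stop : List String) (out : Int) : Decidable (Spec_longest_stop_prefix_suffix_py text stop out) := by unfold Spec_longest_stop_prefix_suffix_py; infer_instance

-- ===== CLAIM (what is proved, stated in full; the proofs are below) =====
def Claim_equal_longest_stop_prefix_suffix_py : Prop := ∀ (text : String) (stop : List String), Dom_longest_stop_prefix_suffix_py text stop → Spec_longest_stop_prefix_suffix_py text stop (longest_stop_prefix_suffix_py text stop)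

-- ===== LEMMAS AND PROOFS =====

-- 'text ends with marker[:s]' as a proposition
def pvHitA (text marker : String) (s : Int) : Prop :=
  PySem.Str.endswith text (PySem.Str.slice marker none (some s)) = true

-- the shared mathematical predicate: s is a valid overlap length for some marker
def pvP (text : String) (stop : List String) (s : Int) : Prop :=
  ∃ m ∈ stop, s ≤ PySem.Str.len m - 1 ∧ s ≤ PySem.Str.len text ∧ pvHitA text m s

-- endswith(text, m[:s])  =  m.startswith(text[len(text)-s:])  on the shared bounds
lemma pvHit_bridge (text m : String) (s : Int) (h1 : 1 ≤ s)
    (hn : s ≤ PySem.Str.len text) (hm : s ≤ PySem.Str.len m - 1) :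
    PySem.Str.endswith text (PySem.Str.slice m none (some s)) =
      PySem.Str.startswith m (PySem.Str.slice text (some (PySem.Str.len text - s)) none) := by
  rw [PySem.Str.endswith_eq, PySem.Str.startswith_eq, PySem.Str.toList_slice,
      PySem.Str.toList_slice, PySem.Chars.slice_eq_listSlice, PySem.Chars.slice_eq_listSlice]
  rw [PySem.Str.len_eq] at hn hm
  rw [PySem.Str.len_eq]
  rw [PySem.List.slice_to m.toList (by omega : (0:Int) ≤ s),
      PySem.List.slice_from text.toList (by omega : (0:Int) ≤ (text.toList.length : Int) - s)]
  have htn : ((text.toList.length : Int) - s).toNat = text.toList.length - s.toNat := by omega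
  rw [htn]
  rw [Bool.eq_iff_iff, PySem.Chars.endswith_iff, PySem.Chars.startswith_iff,
      List.suffix_iff_eq_drop, List.prefix_iff_eq_take]
  have hlt : (List.take s.toNat m.toList).length = s.toNat := by
    rw [List.length_take]; omega
  have hld : (List.drop (text.toList.length - s.toNat) text.toList).length = s.toNat := by
    rw [List.length_drop]; omega
  rw [hlt, hld]
  constructor
  · intro h; exact h.symm
  · intro h; exact h.symm

-- characterization of A's inner descending loop
lemma pvAInner_char (text marker : String) :
    ∀ (n : Nat) (c : Int), c ≤ (n : Int) → ∀ longest,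
    (pvAInner text marker (PySem.List.pyRange c 0 (-1)) longest = longest ∨
      (1 ≤ pvAInner text marker (PySem.List.pyRange c 0 (-1)) longest ∧
       pvAInner text marker (PySem.List.pyRange c 0 (-1)) longest ≤ c ∧
       pvHitA text marker (pvAInner text marker (PySem.List.pyRange c 0 (-1)) longest))) ∧
    longest ≤ pvAInner text marker (PySem.List.pyRange c 0 (-1)) longest ∧
    (∀ s, 1 ≤ s → s ≤ c → pvAInner text marker (PySem.List.pyRange c 0 (-1)) longest < s →
      ¬ pvHitA text marker s) := by
  intro n
  induction n with
  | zero =>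
    intro c hc longest
    rw [PySem.List.pyRange_neg_one_eq_nil (by omega : c ≤ 0)]
    exact ⟨Or.inl rfl, le_refl _, fun s hs1 hs2 _ _ => by omega⟩
  | succ k ih =>
    intro c hc longest
    by_cases hc0 : c ≤ 0
    · rw [PySem.List.pyRange_neg_one_eq_nil hc0]
      exact ⟨Or.inl rfl, le_refl _, fun s hs1 hs2 _ _ => by omega⟩
    · rw [PySem.List.pyRange_neg_one_cons (by omega : (0:Int) < c)]
      simp only [pvAInner]
      by_cases hhit : PySem.Str.endswith text (PySem.Str.slice marker none (some c)) = true
      · rw [if_pos hhit]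
        refine ⟨?_, le_max_left _ _, ?_⟩
        · by_cases hlc : longest ≤ c
          · right
            have hmax : max longest c = c := by omega
            rw [hmax]; exact ⟨by omega, le_refl _, hhit⟩
          · left; omega
        · intro s hs1 hs2 hlt _
          have : c ≤ max longest c := le_max_right _ _
          omega
      · rw [if_neg hhit]
        obtain ⟨h1, h2, h3⟩ := ih (c - 1) (by omega) longest
        refine ⟨?_, h2, ?_⟩
        · rcases h1 with h | ⟨ha, hb, hh⟩
          · exact Or.inl h
          · exact Or.inr ⟨ha, by omega, hh⟩
        · intro s hs1 hs2 hlt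
          by_cases hsc : s = c
          · subst hsc; exact hhit
          · exact h3 s hs1 (by omega) hlt

-- per-marker step: a hit within max_len is a pvP-hit for that marker
lemma pvAStep_char (text marker : String) (longest : Int) :
    (pvAStep text longest marker = longest ∨
      (1 ≤ pvAStep text longest marker ∧ pvAStep text longest marker ≤ PySem.Str.len marker - 1 ∧
       pvAStep text longest marker ≤ PySem.Str.len text ∧ pvHitA text marker (pvAStep text longest marker))) ∧
    longest ≤ pvAStep text longest marker ∧
    (∀ s, 1 ≤ s → s ≤ PySem.Str.len marker - 1 → s ≤ PySem.Str.len text →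
      pvAStep text longest marker < s → ¬ pvHitA text marker s) := by
  simp only [pvAStep]
  set c := min (PySem.Str.len marker - 1) (PySem.Str.len text) with hc
  have hcb : c ≤ ((max c 0).toNat : Int) := by omega
  obtain ⟨h1, h2, h3⟩ := pvAInner_char text marker (max c 0).toNat c hcb longest
  refine ⟨?_, h2, ?_⟩
  · rcases h1 with h | ⟨ha, hb, hh⟩
    · exact Or.inl h
    · exact Or.inr ⟨ha, by omega, by omega, hh⟩
  · intro s hs1 hs2 hs3 hlt
    exact h3 s hs1 (by omega) hlt

-- characterization of A's fold over the markers
lemma pvAFold_char (text : String) :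
    ∀ (stop : List String) (acc : Int),
    (stop.foldl (pvAStep text) acc = acc ∨
      (1 ≤ stop.foldl (pvAStep text) acc ∧ pvP text stop (stop.foldl (pvAStep text) acc))) ∧
    acc ≤ stop.foldl (pvAStep text) acc ∧
    (∀ s, 1 ≤ s → stop.foldl (pvAStep text) acc < s → ¬ pvP text stop s) := by
  intro stop
  induction stop with
  | nil =>
    intro acc
    refine ⟨Or.inl rfl, le_refl _, ?_⟩
    rintro s - - ⟨m, hm, -⟩
    exact absurd hm (List.not_mem_nil)
  | cons marker rest ih =>
    intro acc
    simp only [List.foldl_cons]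
    obtain ⟨s1, s2, s3⟩ := pvAStep_char text marker acc
    obtain ⟨h1, h2, h3⟩ := ih (pvAStep text acc marker)
    refine ⟨?_, le_trans s2 h2, ?_⟩
    · rcases h1 with h | ⟨ha, hrest⟩
      · rw [h]
        rcases s1 with h' | ⟨ha', hb', hc', hd'⟩
        · exact Or.inl h'
        · exact Or.inr ⟨ha', marker, List.mem_cons_self, hb', hc', hd'⟩
      · right
        obtain ⟨m, hmem, hrest'⟩ := hrest
        exact ⟨ha, m, List.mem_cons_of_mem _ hmem, hrest'⟩
    · rintro s hs1 hlt ⟨m, hmem, hb, hc, hd⟩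
      rcases List.mem_cons.mp hmem with rfl | hmem'
      · exact s3 s hs1 hb hc (by omega) hd
      · exact h3 s hs1 hlt ⟨m, hmem', hb, hc, hd⟩

-- B's any-condition, as a proposition (given the suffix length is in range)
lemma pvBHit_iff (text : String) (stop : List String) (s : Int) (h1 : 1 ≤ s)
    (hn : s ≤ PySem.Str.len text) :
    (stop.any (fun m => decide (s ≤ PySem.Str.len m - 1) &&
        PySem.Str.startswith m (PySem.Str.slice text (some (PySem.Str.len text - s)) none)) = true)
      ↔ pvP text stop s := by
  rw [List.any_eq_true]
  constructor
  · rintro ⟨m, hmem, hcond⟩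
    rw [Bool.and_eq_true, decide_eq_true_iff] at hcond
    obtain ⟨hb, hsw⟩ := hcond
    refine ⟨m, hmem, hb, hn, ?_⟩
    unfold pvHitA
    rw [pvHit_bridge text m s h1 hn hb]
    exact hsw
  · rintro ⟨m, hmem, hb, _, hh⟩
    refine ⟨m, hmem, ?_⟩
    rw [Bool.and_eq_true, decide_eq_true_iff]
    refine ⟨hb, ?_⟩
    unfold pvHitA at hh
    rw [pvHit_bridge text m s h1 hn hb] at hh
    exact hh

-- characterization of B's descending scan
lemma pvBScan_char (text : String) (stop : List String) :
    ∀ (n : Nat) (c : Int), c ≤ (n : Int) → c ≤ PySem.Str.len text →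
    let r := pvBScan text stop (PySem.List.pyRange c 0 (-1))
    (r = 0 ∨ (1 ≤ r ∧ r ≤ c ∧ pvP text stop r)) ∧
    (∀ s, 1 ≤ s → s ≤ c → r < s → ¬ pvP text stop s) := by
  intro n
  induction n with
  | zero =>
    intro c hc _
    rw [PySem.List.pyRange_neg_one_eq_nil (by omega : c ≤ 0)]
    exact ⟨Or.inl rfl, fun s hs1 hs2 _ _ => by omega⟩
  | succ k ih =>
    intro c hc hct
    by_cases hc0 : c ≤ 0
    · rw [PySem.List.pyRange_neg_one_eq_nil hc0]
      exact ⟨Or.inl rfl, fun s hs1 hs2 _ _ => by omega⟩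
    · rw [PySem.List.pyRange_neg_one_cons (by omega : (0:Int) < c)]
      simp only [pvBScan]
      by_cases hhit : stop.any (fun m => decide (c ≤ PySem.Str.len m - 1) &&
          PySem.Str.startswith m (PySem.Str.slice text (some (PySem.Str.len text - c)) none)) = true
      · rw [if_pos hhit]
        refine ⟨Or.inr ⟨by omega, le_refl _, (pvBHit_iff text stop c (by omega) hct).mp hhit⟩, ?_⟩
        intro s _ hs2 hlt _; omega
      · rw [if_neg hhit]
        obtain ⟨h1, h2⟩ := ih (c - 1) (by omega) (by omega)
        refine ⟨?_, ?_⟩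
        · rcases h1 with h | ⟨ha, hb, hh⟩
          · exact Or.inl h
          · exact Or.inr ⟨ha, by omega, hh⟩
        · intro s hs1 hs2 hlt hP
          by_cases hsc : s = c
          · subst hsc
            exact hhit ((pvBHit_iff text stop s hs1 hct).mpr hP)
          · exact h2 s hs1 (by omega) hlt hP

-- every marker's len-1 is bounded by B's fold-max
lemma pvFoldMax_ge :
    ∀ (l : List String) (acc : Int),
    (acc ≤ l.foldl (fun a m => max a (PySem.Str.len m - 1)) acc) ∧
    (∀ m ∈ l, PySem.Str.len m - 1 ≤ l.foldl (fun a m => max a (PySem.Str.len m - 1)) acc) := by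
  intro l
  induction l with
  | nil => exact fun acc => ⟨le_refl _, fun m hm => absurd hm (List.not_mem_nil)⟩
  | cons x rest ih =>
    intro acc
    simp only [List.foldl_cons]
    obtain ⟨h1, h2⟩ := ih (max acc (PySem.Str.len x - 1))
    refine ⟨le_trans (le_max_left _ _) h1, ?_⟩
    intro m hm
    rcases List.mem_cons.mp hm with rfl | hm'
    · exact le_trans (le_max_right _ _) h1
    · exact h2 m hm'

-- ===== VERDICT (by name: the statement is the Claim_ definition above) =====
theorem longest_stop_prefix_suffix_py_spec : Claim_equal_longest_stop_prefix_suffix_py := by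
  intro text stop _
  unfold Spec_longest_stop_prefix_suffix_py
  unfold longest_stop_prefix_suffix_py longest_stop_prefix_suffix_py_alt
  obtain ⟨a1, a2, a3⟩ := pvAFold_char text stop 0
  set cap0 := stop.foldl (fun acc m => max acc (PySem.Str.len m - 1)) 0 with hcap0
  set cap := min cap0 (PySem.Str.len text) with hcap
  have hcapn : (0:Int) ≤ max cap 0 := le_max_right _ _
  obtain ⟨b1, b2⟩ := pvBScan_char text stop (max cap 0).toNat cap (by omega)
      (by simp only [hcap]; omega)
  obtain ⟨hf1, hf2⟩ := pvFoldMax_ge stop 0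
  -- every valid overlap length is ≤ cap
  have hPcap : ∀ s, 1 ≤ s → pvP text stop s → s ≤ cap := by
    rintro s - ⟨m, hmem, hb, hc, -⟩
    have := hf2 m hmem
    simp only [hcap, hcap0]
    omega
  set r1 := stop.foldl (pvAStep text) 0 with hr1
  set r2 := pvBScan text stop (PySem.List.pyRange cap 0 (-1)) with hr2
  -- antisymmetry of the two greatest-valid-length characterizations
  rcases a1 with ha0 | ⟨ha1, haP⟩ <;> rcases b1 with hb0 | ⟨hb1, hbcap, hbP⟩
  · omega
  · exfalso; exact a3 r2 hb1 (by omega) hbP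
  · exfalso; exact b2 r1 ha1 (hPcap r1 ha1 haP) (by omega) haP
  · by_contra hne
    rcases lt_or_gt_of_ne (fun h => hne h) with hlt | hgt
    · exact a3 r2 hb1 hlt hbP
    · exact b2 r1 ha1 (hPcap r1 ha1 haP) hgt haP
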